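-- pv_equiv track=rewrite | github.com/oliviajobradley/DataScraper | second_order_markov.py | build_word_dict
-- ===== SOURCE A (Python) =====
-- def build_word_dict(source_text):
--     """
--     Build a dictionary mapping the previous two words to the
--     next words that follow them in the source text.
--
--     Map each pair of words to all words that follow it in the word list.
--     Duplicates are included, and the list of words that follow a given
--     pair are in the order in which they appear in the source text.
--     The pairs are stored as a tuple, and the following words are
--     stored as a string in a list.
--
--     Args:
--         source_text: A list containing all of the words of the
--             collected titles as strings. Words that are at the
--             beginning of the title start with the  character '^', and
--             words at the end of the title end with the character '*'.
--
--     Returns: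
--         A dictionary of mapped tuples and lists.
--     """
--     tuple_dictionary = {}
--     number_of_words = len(source_text)
--     # For every pair of words in the text, store them as a tuple.
--     # Get the index and value of the first word
--     for index, key1 in enumerate(source_text):
--         # Get the index and value of the second word
--         if number_of_words > index + 2:
--             key2 = source_text[index + 1]
--             following_word = source_text[index + 2]
--             # Map each pair to the following word.
--             # If the pair is new, add it
--             if (key1, key2) not in tuple_dictionary:
--                 tuple_dictionary[(key1, key2)] = [following_word]
--             # If the pair already has something mapped to it,
--             # add the following word as another definition,
--             else:
--                 tuple_dictionary[(key1, key2)].append(following_word)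
--     return tuple_dictionary
-- ===== SOURCE B (Python) =====
-- def build_word_dict(source_text):
--     # Build the list of (w1, w2, w3) triples by zipping the text with its two
--     # tail slices, then group: distinct pairs in first-occurrence order, and
--     # for each pair a scan collecting its followers in text order.
--     triples = list(zip(source_text, source_text[1:], source_text[2:]))
--     keys = dict.fromkeys((a, b) for a, b, _ in triples)
--     return {k: [c for a, b, c in triples if (a, b) == k] for k in keys}
-- ===== Notes on version B (the rewrite author's own statement) =====
-- stated objective: alternative
-- what changed: Replaces the single-pass dict accumulation with a zip-then-group decomposition: build the (w1,w2,w3) triple list by zipping the text with its two tail slices, take the distinct pairs in first-occurrence order, and collect each pair's followers by a scan over the triples.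
import Mathlib
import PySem

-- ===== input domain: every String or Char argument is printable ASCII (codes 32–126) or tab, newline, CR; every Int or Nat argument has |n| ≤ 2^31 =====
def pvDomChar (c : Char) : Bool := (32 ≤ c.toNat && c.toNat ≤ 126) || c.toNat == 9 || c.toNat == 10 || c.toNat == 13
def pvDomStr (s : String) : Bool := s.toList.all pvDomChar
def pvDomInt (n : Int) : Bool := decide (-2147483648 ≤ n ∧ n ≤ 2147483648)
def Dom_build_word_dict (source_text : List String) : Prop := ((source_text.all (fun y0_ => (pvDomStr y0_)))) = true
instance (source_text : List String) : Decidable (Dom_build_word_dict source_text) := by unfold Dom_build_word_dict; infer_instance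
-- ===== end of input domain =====

-- B replaces A's single-pass dict accumulation with a zip-triples / dedup-keys / per-key-scan grouping (alternative decomposition, not faster).


-- ===== PORT A =====
def build_word_dict (source_text : List String) : List (String × String × List String) :=
  let number_of_words : Int := source_text.length
  let tuple_dictionary : PySem.Dict (String × String) (List String) :=
    (PySem.List.enumerate source_text).foldl (fun td p =>
      let index := p.1
      let key1 := p.2
      if number_of_words > index + 2 then
        -- here index+1 and index+2 are in range, so Python's indexing cannot raise
        -- (pyGetD's default is never reached)
        let key2 := PySem.List.pyGetD source_text (index + 1) ""
        let following_word := PySem.List.pyGetD source_text (index + 2) ""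
        match td.get? (key1, key2) with
        | none => td.insert (key1, key2) [following_word]
        | some l => td.insert (key1, key2) (l ++ [following_word])
      else td) PySem.Dict.empty
  tuple_dictionary.items.map (fun q => (q.1.1, q.1.2, q.2))

-- ===== PORT B =====
def build_word_dict_alt (source_text : List String) : List (String × String × List String) :=
  let triples := source_text.zip ((PySem.List.slice source_text (some 1) none).zip
                                  (PySem.List.slice source_text (some 2) none))
  let keys := PySem.List.dedup (triples.map (fun t => (t.1, t.2.1)))
  keys.map (fun k => (k.1, k.2,
    (triples.filter (fun t => (t.1, t.2.1) == k)).map (fun t => t.2.2)))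

-- ===== PRECONDITION & SPEC =====
def Spec_build_word_dict (source_text : List String) (out : List (String × String × List String)) : Prop := out = build_word_dict_alt source_text
instance (source_text : List String) (out : List (String × String × List String)) : Decidable (Spec_build_word_dict source_text out) := by unfold Spec_build_word_dict; infer_instance

-- ===== CLAIM (what is proved, stated in full; the proofs are below) =====
def Claim_equal_build_word_dict : Prop := ∀ (source_text : List String), Dom_build_word_dict source_text → Spec_build_word_dict source_text (build_word_dict source_text)

-- ===== LEMMAS AND PROOFS =====

-- A's loop body, as a function of the triple it processes (proof-side name).
def stepA (td : PySem.Dict (String × String) (List String))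
    (x : String × String × String) : PySem.Dict (String × String) (List String) :=
  match td.get? (x.1, x.2.1) with
  | none => td.insert (x.1, x.2.1) [x.2.2]
  | some l => td.insert (x.1, x.2.1) (l ++ [x.2.2])

-- A's "absent → insert [v] / present → append" branch is exactly Dict.modify with default [].
theorem stepA_eq_modify (td : PySem.Dict (String × String) (List String))
    (x : String × String × String) :
    stepA td x = td.modify (x.1, x.2.1) [] (fun l => l ++ [x.2.2]) := by
  unfold stepA
  cases h : td.get? (x.1, x.2.1) with
  | none =>
      simp [PySem.Dict.modify, PySem.Dict.getD_eq_get?_getD, h]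
  | some l =>
      simp [PySem.Dict.modify, PySem.Dict.getD_eq_get?_getD, h]

-- A's enumerate-and-index loop over a suffix equals the stepA fold over that suffix's triples.
theorem bridge (s : List String) :
    ∀ (t : List String) (k : Nat) (td : PySem.Dict (String × String) (List String)),
    t = s.drop k →
    (PySem.List.enumerate t (k : Int)).foldl (fun td p =>
        if (s.length : Int) > p.1 + 2 then
          stepA td (p.2, PySem.List.pyGetD s (p.1 + 1) "", PySem.List.pyGetD s (p.1 + 2) "")
        else td) td
      = (t.zip ((t.drop 1).zip (t.drop 2))).foldl stepA td := by
  intro t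
  induction t with
  | nil => intro k td _; simp [PySem.List.enumerate]
  | cons a t' ih =>
      intro k td ht
      have hlen : t'.length + 1 = s.length - k := by
        have := congrArg List.length ht; simpa using this
      have hk : k < s.length := by omega
      have hcast : (k : Int) + 1 = ((k + 1 : Nat) : Int) := by push_cast; ring
      rw [PySem.List.enumerate_cons]
      by_cases hcond : (s.length : Int) > (k : Int) + 2
      · have hk2 : k + 2 < s.length := by exact_mod_cast hcond
        obtain ⟨b, t'', rfl⟩ : ∃ b t'', t' = b :: t'' := by
          cases t' with
          | nil => exfalso; simp at hlen; omega
          | cons b t'' => exact ⟨b, t'', rfl⟩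
        obtain ⟨c, rest, rfl⟩ : ∃ c rest, t'' = c :: rest := by
          cases t'' with
          | nil => exfalso; simp at hlen; omega
          | cons c rest => exact ⟨c, rest, rfl⟩
        have hb : PySem.List.pyGetD s ((k : Int) + 1) "" = b := by
          rw [hcast, PySem.List.pyGetD_natCast]
          have h1 : s[k + 1]? = some b := by
            have h2 : (s.drop k)[1]? = s[k + 1]? := List.getElem?_drop
            rw [← ht] at h2; simpa using h2.symm
          simp [List.getD_eq_getElem?_getD, h1]
        have hc : PySem.List.pyGetD s ((k : Int) + 2) "" = c := by
          have hcast2 : (k : Int) + 2 = ((k + 2 : Nat) : Int) := by push_cast; ring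
          rw [hcast2, PySem.List.pyGetD_natCast]
          have h1 : s[k + 2]? = some c := by
            have h2 : (s.drop k)[2]? = s[k + 2]? := List.getElem?_drop
            rw [← ht] at h2; simpa using h2.symm
          simp [List.getD_eq_getElem?_getD, h1]
        have hdrop : b :: c :: rest = s.drop (k + 1) := by
          have := congrArg (List.drop 1) ht
          simpa [List.drop_drop] using this
        simp only [List.foldl_cons, if_pos hcond, hb, hc]
        rw [hcast, ih (k + 1) _ hdrop]
        simp
      · have hle : t'.length ≤ 1 := by
          have : ¬ (k + 2 < s.length) := by
            intro h; exact hcond (by exact_mod_cast h)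
          omega
        have hdrop1 : t'.drop 1 = [] := by
          rw [List.drop_eq_nil_iff]; omega
        have hdrop' : t' = s.drop (k + 1) := by
          have := congrArg (List.drop 1) ht
          simpa [List.drop_drop] using this
        simp only [List.foldl_cons, if_neg hcond]
        rw [hcast, ih (k + 1) td hdrop']
        cases t' with
        | nil => simp
        | cons b t'' =>
            have ht'' : t'' = [] := by simpa using hdrop1
            subst ht''; simp [hdrop1]

theorem build_word_dict_eq_stepA_fold (s : List String) :
    build_word_dict s =
      ((s.zip ((s.drop 1).zip (s.drop 2))).foldl stepA PySem.Dict.empty).items.map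
        (fun q => (q.1.1, q.1.2, q.2)) := by
  have h := bridge s s 0 PySem.Dict.empty (by simp)
  simp only [Nat.cast_zero] at h
  unfold build_word_dict
  dsimp only
  rw [show (fun (td : PySem.Dict (String × String) (List String)) (p : Int × String) =>
        if (s.length : Int) > p.1 + 2 then
          match td.get? (p.2, PySem.List.pyGetD s (p.1 + 1) "") with
          | none => td.insert (p.2, PySem.List.pyGetD s (p.1 + 1) "")
                      [PySem.List.pyGetD s (p.1 + 2) ""]
          | some l => td.insert (p.2, PySem.List.pyGetD s (p.1 + 1) "")
                      (l ++ [PySem.List.pyGetD s (p.1 + 2) ""])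
        else td)
      = (fun td p =>
        if (s.length : Int) > p.1 + 2 then
          stepA td (p.2, PySem.List.pyGetD s (p.1 + 1) "", PySem.List.pyGetD s (p.1 + 2) "")
        else td) from rfl]
  rw [h]

theorem build_word_dict_spec' (s : List String) :
    build_word_dict s = build_word_dict_alt s := by
  rw [build_word_dict_eq_stepA_fold]
  unfold build_word_dict_alt
  have hslice1 : PySem.List.slice s (some 1) none = s.drop 1 := by
    simpa using PySem.List.slice_from_natCast s 1
  have hslice2 : PySem.List.slice s (some 2) none = s.drop 2 := by
    simpa using PySem.List.slice_from_natCast s 2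
  rw [hslice1, hslice2]
  set t3 := s.zip ((s.drop 1).zip (s.drop 2)) with ht3
  have hstep : t3.foldl stepA PySem.Dict.empty
      = t3.foldl (fun td x => td.modify (x.1, x.2.1) [] (fun l => l ++ [x.2.2]))
          PySem.Dict.empty :=
    PySem.List.foldl_congr_mem t3 _ _ _ (fun td x _ => stepA_eq_modify td x)
  rw [hstep]
  set D := t3.foldl (fun td x => td.modify (x.1, x.2.1) [] (fun l => l ++ [x.2.2]))
      PySem.Dict.empty with hD
  have hkeys : D.keys = PySem.List.dedup (t3.map (fun x => (x.1, x.2.1))) := by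
    rw [hD, PySem.Dict.keys_foldl_modify_key t3 (fun x => (x.1, x.2.1)) []
          (fun _ x l => l ++ [x.2.2]) PySem.Dict.empty]
    simp [PySem.List.dedup, PySem.Set.update, PySem.Set.ofList, PySem.Dict.keys_empty,
          PySem.Set.empty]
  have hnodup : D.keys.Nodup := by
    rw [hD]
    exact PySem.Dict.nodup_keys_foldl_modify_key t3 (fun x => (x.1, x.2.1)) []
      (fun _ x l => l ++ [x.2.2]) PySem.Dict.empty (by simp)
  have hgetD : ∀ k, D.getD k [] =
      (t3.filter (fun x => (x.1, x.2.1) == k)).map (fun x => x.2.2) := by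
    intro k
    have hmap : D = (t3.map (fun x => ((x.1, x.2.1), x.2.2))).foldl
        (fun d p => d.modify p.1 [] (fun l => l ++ [p.2])) PySem.Dict.empty := by
      rw [hD, List.foldl_map]
    rw [hmap, PySem.Dict.getD_foldl_modify_append]
    simp [List.filter_map, List.map_map, Function.comp_def]
  rw [PySem.Dict.items_eq_map_keys D hnodup []]
  rw [hkeys]
  simp only [List.map_map]
  apply List.map_congr_left
  intro k _
  simp [hgetD k]

-- ===== VERDICT (by name: the statement is the Claim_ definition above) =====
theorem build_word_dict_spec : Claim_equal_build_word_dict := by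
  intro s _
  exact build_word_dict_spec' s
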